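-- pv_equiv track=rewrite | github.com/abdelrahman-helal/Feynstein | utils/model_handler.py | _extract_physics_principles
-- ===== SOURCE A (Python) =====
-- from typing import List, Dict, Any
--
-- def _extract_physics_principles(steps: List[str]) -> List[str]:
--     """
--     Extract key physics principles mentioned in the steps.
--     """
--     principles = []
--     physics_keywords = [
--         "conservation", "force", "energy", "momentum", "velocity",
--         "acceleration", "mass", "gravity", "electric", "magnetic",
--         "wave", "particle", "field", "potential", "kinetic",
--         "quantum", "classical", "relativity", "hamiltonian", "lagrangian"
--     ]
--
--     for step in steps:
--         for keyword in physics_keywords: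
--             if keyword in step.lower():
--                 principles.append(step)
--                 break
--     return principles
-- ===== SOURCE B (Python) =====
-- _PHYSICS_KEYWORDS = [
--     "conservation", "force", "energy", "momentum", "velocity",
--     "acceleration", "mass", "gravity", "electric", "magnetic",
--     "wave", "particle", "field", "potential", "kinetic",
--     "quantum", "classical", "relativity", "hamiltonian", "lagrangian"
-- ]
--
-- # First-letter index: maps a character to the keywords starting with it,
-- # in keyword-list order.  Built once at module load.
-- _INDEX = {}
-- for _kw in _PHYSICS_KEYWORDS:
--     _INDEX.setdefault(_kw[0], []).append(_kw)
--
-- def _has_keyword(text):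
--     # One left-to-right scan over the text: at each position only the
--     # keywords whose first letter matches the current character are tried.
--     for i, ch in enumerate(text):
--         for kw in _INDEX.get(ch, ()):
--             if text.startswith(kw, i):
--                 return True
--     return False
--
-- def _extract_physics_principles(steps):
--     out = []
--     for step in steps:
--         if _has_keyword(step.lower()):
--             out.append(step)
--     return out
-- ===== Notes on version B (the rewrite author's own statement) =====
-- stated objective: alternative
-- what changed: Replaces A's per-keyword substring scans (20 'kw in text' tests with break) by a dict mapping first letters to keyword buckets built once, then a single left-to-right scan of each lowered step that tries only the bucket of the current character with startswith at that position.
import Mathlib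
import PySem

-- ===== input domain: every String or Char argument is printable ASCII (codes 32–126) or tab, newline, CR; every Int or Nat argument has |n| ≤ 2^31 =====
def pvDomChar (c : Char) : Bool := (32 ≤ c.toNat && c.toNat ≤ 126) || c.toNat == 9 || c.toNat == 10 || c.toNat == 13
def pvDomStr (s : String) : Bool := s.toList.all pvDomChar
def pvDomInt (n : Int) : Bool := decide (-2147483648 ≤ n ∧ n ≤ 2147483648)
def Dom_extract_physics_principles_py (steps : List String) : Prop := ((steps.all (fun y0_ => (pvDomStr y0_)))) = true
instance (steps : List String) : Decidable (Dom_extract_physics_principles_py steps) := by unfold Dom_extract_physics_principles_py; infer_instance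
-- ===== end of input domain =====

-- B indexes the keywords by first letter in a dict built once and scans each step left to right,
-- trying at each position only the keywords whose first letter matches (alternative algorithm; no speed claim).


-- ===== PORT A =====
-- the list of physics keywords (shared literal; A loops over it, B builds its index from it)
def pvKeywords : List String :=
  ["conservation", "force", "energy", "momentum", "velocity",
   "acceleration", "mass", "gravity", "electric", "magnetic",
   "wave", "particle", "field", "potential", "kinetic",
   "quantum", "classical", "relativity", "hamiltonian", "lagrangian"]

-- inner 'for keyword … break' loop of A: append step on first matching keyword
def pvInnerA (ks : List String) (step : String) (principles : List String) : List String :=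
  match ks with
  | [] => principles
  | k :: rest =>
    if PySem.Str.isIn k (PySem.Str.lower step) then principles ++ [step]
    else pvInnerA rest step principles

def extract_physics_principles_py (steps : List String) : List String :=
  steps.foldl (fun principles step => pvInnerA pvKeywords step principles) []

-- ===== PORT B =====
-- kw[0] of a keyword (every keyword literal is nonempty, so headD's default is never used)
def pvFirstChar (k : String) : Char := k.toList.headD ' '

-- _INDEX: for kw in keywords: _INDEX.setdefault(kw[0], []).append(kw)
def pvIndex : PySem.Dict Char (List String) :=
  (pvKeywords.map (fun k => (pvFirstChar k, k))).foldl
    (fun d p => d.modify p.1 [] (· ++ [p.2])) PySem.Dict.empty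

-- _has_keyword: scan positions left to right (recursion over the remaining suffix;
-- text.startswith(kw, i) is exactly 'kw.toList.isPrefixOf suffix' for the suffix at i)
def pvHasKeyword : List Char → Bool
  | [] => false
  | c :: rest =>
    (pvIndex.getD c []).any (fun k => k.toList.isPrefixOf (c :: rest)) || pvHasKeyword rest

def extract_physics_principles_py_alt (steps : List String) : List String :=
  steps.foldl (fun out step =>
    if pvHasKeyword (PySem.Str.lower step).toList then out ++ [step] else out) []

-- ===== PRECONDITION & SPEC =====
def Spec_extract_physics_principles_py (steps : List String) (out : List String) : Prop := out = extract_physics_principles_py_alt steps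
instance (steps : List String) (out : List String) : Decidable (Spec_extract_physics_principles_py steps out) := by unfold Spec_extract_physics_principles_py; infer_instance

-- ===== CLAIM =====
def Claim_equal_extract_physics_principles_py : Prop := ∀ (steps : List String), Dom_extract_physics_principles_py steps → Spec_extract_physics_principles_py steps (extract_physics_principles_py steps)

-- ===== LEMMAS AND PROOFS =====
lemma pvInnerA_eq (ks : List String) (step : String) (acc : List String) :
    pvInnerA ks step acc =
      if ks.any (fun k => PySem.Str.isIn k (PySem.Str.lower step)) then acc ++ [step] else acc := by
  induction ks with
  | nil => simp [pvInnerA]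
  | cons k rest ih =>
    rw [pvInnerA, List.any_cons]
    cases h : PySem.Str.isIn k (PySem.Str.lower step)
    · rw [Bool.false_or, if_neg (by simp)]; exact ih
    · rw [Bool.true_or]; simp

lemma pvBucket_eq (c : Char) :
    pvIndex.getD c [] = pvKeywords.filter (fun k => pvFirstChar k == c) := by
  rw [pvIndex, PySem.Dict.getD_foldl_modify_append]
  simp [List.filter_map, Function.comp_def]

lemma pvMem_bucket (c : Char) (k : String) :
    k ∈ pvIndex.getD c [] ↔ k ∈ pvKeywords ∧ pvFirstChar k = c := by
  rw [pvBucket_eq]; simp [List.mem_filter]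

lemma pvKeywords_nonempty : ∀ k ∈ pvKeywords, k.toList ≠ [] := by decide

lemma pvHasKeyword_iff (cs : List Char) :
    pvHasKeyword cs = true ↔ ∃ k ∈ pvKeywords, k.toList <:+: cs := by
  induction cs with
  | nil =>
    refine iff_of_false (by simp [pvHasKeyword]) ?_
    rintro ⟨k, hk, hinf⟩
    exact pvKeywords_nonempty k hk (List.eq_nil_of_infix_nil hinf)
  | cons c rest ih =>
    simp only [pvHasKeyword, Bool.or_eq_true, List.any_eq_true, ih]
    constructor
    · rintro (⟨k, hk, hp⟩ | ⟨k, hk, hinf⟩)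
      · have hp' : k.toList <+: (c :: rest) := by simpa using hp
        exact ⟨k, ((pvMem_bucket c k).mp hk).1, hp'.isInfix⟩
      · exact ⟨k, hk, List.infix_cons_iff.mpr (Or.inr hinf)⟩
    · rintro ⟨k, hk, hinf⟩
      rcases List.infix_cons_iff.mp hinf with hp | hi
      · left
        have hne := pvKeywords_nonempty k hk
        obtain ⟨x, tl, hxt⟩ := List.exists_cons_of_ne_nil hne
        have hxc : x = c := by
          rw [hxt] at hp; exact (List.cons_prefix_cons.mp hp).1
        refine ⟨k, (pvMem_bucket c k).mpr ⟨hk, ?_⟩, by simpa using hp⟩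
        simp [pvFirstChar, hxt, hxc]
      · right; exact ⟨k, hk, hi⟩

-- per-step agreement: A's inner keyword loop finds a match iff B's indexed scan does
lemma pvStep_eq (s : String) :
    (pvKeywords.any (fun k => PySem.Str.isIn k (PySem.Str.lower s))) =
      pvHasKeyword (PySem.Str.lower s).toList := by
  rw [Bool.eq_iff_iff, List.any_eq_true, pvHasKeyword_iff]
  constructor
  · rintro ⟨k, hk, h⟩; exact ⟨k, hk, (PySem.Str.isIn_iff_infix k _).mp h⟩
  · rintro ⟨k, hk, h⟩; exact ⟨k, hk, (PySem.Str.isIn_iff_infix k _).mpr h⟩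

-- ===== VERDICT =====
theorem extract_physics_principles_py_spec : Claim_equal_extract_physics_principles_py := by
  intro steps _
  unfold Spec_extract_physics_principles_py extract_physics_principles_py extract_physics_principles_py_alt
  have hA : steps.foldl (fun principles step => pvInnerA pvKeywords step principles) [] =
      steps.foldl (fun out step =>
        if pvKeywords.any (fun k => PySem.Str.isIn k (PySem.Str.lower step)) then out ++ [step] else out) [] := by
    apply List.foldl_ext
    intro acc x _; exact pvInnerA_eq pvKeywords x acc
  rw [hA]
  apply Eq.symm
  apply List.foldl_ext
  intro acc x _
  rw [pvStep_eq]
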